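-- pv_equiv track=rewrite | github.com/gregoryann/Python-Beginner-Examples | Edabit +1500 Python Challenges/Medium/Union and Intersection of Lists.py | intersection_union
-- ===== SOURCE A (Python) =====
-- def intersection_union(lst1, lst2):
--
-- 	intList = []
--
-- 	unionList = []
--
-- 	linkedLists = lst1 + lst2
--
-- 	for i in lst1:
-- 			if i in lst2 and i not in intList:
-- 					intList.append(i)
--
-- 	for i in linkedLists:
-- 			if i not in unionList:
-- 					unionList.append(i)
--
-- 	return [sorted(intList), sorted(unionList)]
-- ===== SOURCE B (Python) =====
-- def intersection_union(lst1, lst2):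
--     s1, s2 = set(lst1), set(lst2)
--     return [sorted(s1 & s2), sorted(s1 | s2)]
-- ===== Notes on version B (the rewrite author's own statement) =====
-- stated objective: faster
-- what changed: Replaces the two quadratic membership-scan loops with hash sets and set operators (& and |), then sorts the results.
import Mathlib
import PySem

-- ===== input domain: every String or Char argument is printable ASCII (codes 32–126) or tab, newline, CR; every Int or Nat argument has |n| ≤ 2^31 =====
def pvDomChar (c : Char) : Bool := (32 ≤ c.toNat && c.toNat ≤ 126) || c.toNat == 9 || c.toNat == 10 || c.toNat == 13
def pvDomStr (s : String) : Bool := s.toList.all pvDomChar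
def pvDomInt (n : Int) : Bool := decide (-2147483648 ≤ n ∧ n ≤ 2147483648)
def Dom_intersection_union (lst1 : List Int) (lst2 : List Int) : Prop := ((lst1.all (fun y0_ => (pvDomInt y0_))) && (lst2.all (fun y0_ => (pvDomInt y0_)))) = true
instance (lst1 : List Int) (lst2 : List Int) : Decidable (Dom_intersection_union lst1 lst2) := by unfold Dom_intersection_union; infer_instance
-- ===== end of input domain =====

-- B replaces A's two quadratic membership-scan loops with sets and the & / | operators (measurably faster on large inputs).


-- ===== PORT A =====
def intersection_union (lst1 : List Int) (lst2 : List Int) : List (List Int) :=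
  let linkedLists := lst1 ++ lst2
  let intList := lst1.foldl
    (fun acc i => if lst2.contains i && !(acc.contains i) then acc ++ [i] else acc) []
  let unionList := linkedLists.foldl
    (fun acc i => if !(acc.contains i) then acc ++ [i] else acc) []
  [PySem.List.sorted intList (fun x => x) false, PySem.List.sorted unionList (fun x => x) false]

-- ===== PORT B =====
def intersection_union_alt (lst1 : List Int) (lst2 : List Int) : List (List Int) :=
  let s1 : PySem.Set Int := PySem.Set.ofList lst1
  let s2 : PySem.Set Int := PySem.Set.ofList lst2
  [PySem.List.sorted (PySem.Set.inter s1 s2) (fun x => x) false,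
   PySem.List.sorted (PySem.Set.union s1 s2) (fun x => x) false]

-- ===== PRECONDITION & SPEC =====
def Spec_intersection_union (lst1 : List Int) (lst2 : List Int) (out : List (List Int)) : Prop := out = intersection_union_alt lst1 lst2
instance (lst1 : List Int) (lst2 : List Int) (out : List (List Int)) : Decidable (Spec_intersection_union lst1 lst2 out) := by unfold Spec_intersection_union; infer_instance

-- ===== CLAIM (what is proved, stated in full; the proofs are below) =====
def Claim_equal_intersection_union : Prop := ∀ (lst1 : List Int) (lst2 : List Int), Dom_intersection_union lst1 lst2 → Spec_intersection_union lst1 lst2 (intersection_union lst1 lst2)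

-- ===== LEMMAS AND PROOFS =====

-- A's intersection loop: membership and no-duplicates invariant.
theorem intLoop_mem (lst2 l : List Int) (acc : List Int) (x : Int) :
    x ∈ l.foldl (fun acc i => if lst2.contains i && !(acc.contains i) then acc ++ [i] else acc) acc
      ↔ x ∈ acc ∨ (x ∈ l ∧ x ∈ lst2) := by
  induction l generalizing acc with
  | nil => simp
  | cons a t ih =>
    simp only [List.foldl_cons]
    split
    · next h => rw [ih]; simp only [Bool.and_eq_true, Bool.not_eq_true', List.contains_eq_mem, decide_eq_true_eq, decide_eq_false_iff_not] at h; simp [List.mem_append]; aesop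
    · next h => rw [ih]; simp only [Bool.and_eq_true, Bool.not_eq_true', List.contains_eq_mem, decide_eq_true_eq, decide_eq_false_iff_not, not_and] at h; aesop

theorem intLoop_nodup (lst2 l : List Int) (acc : List Int) (hacc : acc.Nodup) :
    (l.foldl (fun acc i => if lst2.contains i && !(acc.contains i) then acc ++ [i] else acc) acc).Nodup := by
  induction l generalizing acc with
  | nil => exact hacc
  | cons a t ih =>
    simp only [List.foldl_cons]
    split
    · next h =>
      simp only [Bool.and_eq_true, Bool.not_eq_true', List.contains_eq_mem, decide_eq_false_iff_not] at h
      refine ih _ ?_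
      simp only [List.nodup_append, List.nodup_singleton, hacc, true_and]
      intro b hb c hc
      simp only [List.mem_singleton] at hc
      exact fun hbc => h.2 ((hc ▸ hbc) ▸ hb)
    · exact ih _ hacc

-- A's union loop: membership and no-duplicates invariant.
theorem unionLoop_mem (l : List Int) (acc : List Int) (x : Int) :
    x ∈ l.foldl (fun acc i => if !(acc.contains i) then acc ++ [i] else acc) acc
      ↔ x ∈ acc ∨ x ∈ l := by
  induction l generalizing acc with
  | nil => simp
  | cons a t ih =>
    simp only [List.foldl_cons]
    split
    · next h => rw [ih]; simp [List.mem_append]; aesop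
    · next h => rw [ih]; simp only [Bool.not_eq_true', List.contains_eq_mem, decide_eq_false_iff_not, not_not] at h; aesop

theorem unionLoop_nodup (l : List Int) (acc : List Int) (hacc : acc.Nodup) :
    (l.foldl (fun acc i => if !(acc.contains i) then acc ++ [i] else acc) acc).Nodup := by
  induction l generalizing acc with
  | nil => exact hacc
  | cons a t ih =>
    simp only [List.foldl_cons]
    split
    · next h =>
      simp only [Bool.not_eq_true', List.contains_eq_mem, decide_eq_false_iff_not] at h
      refine ih _ ?_
      simp only [List.nodup_append, List.nodup_singleton, hacc, true_and]
      intro b hb c hc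
      simp only [List.mem_singleton] at hc
      exact fun hbc => h ((hc ▸ hbc) ▸ hb)
    · exact ih _ hacc

-- ===== VERDICT (by name: the statement is the Claim_ definition above) =====
theorem intersection_union_spec : Claim_equal_intersection_union := by
  intro lst1 lst2 _
  unfold Spec_intersection_union intersection_union intersection_union_alt
  simp only []
  congr 1
  · apply PySem.List.sorted_eq_sorted_of_perm _ _ _ (fun a b h => h)
    refine (List.perm_ext_iff_of_nodup (intLoop_nodup lst2 lst1 [] List.nodup_nil)
      (PySem.Set.nodup_inter _ _ (PySem.Set.nodup_ofList lst1))).mpr ?_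
    intro x
    rw [intLoop_mem, PySem.Set.mem_inter]
    simp [PySem.Set.mem_ofList]
  · congr 1
    apply PySem.List.sorted_eq_sorted_of_perm _ _ _ (fun a b h => h)
    refine (List.perm_ext_iff_of_nodup (unionLoop_nodup (lst1 ++ lst2) [] List.nodup_nil)
      (PySem.Set.nodup_union _ _ (PySem.Set.nodup_ofList lst1))).mpr ?_
    intro x
    rw [unionLoop_mem, PySem.Set.mem_union]
    simp [PySem.Set.mem_ofList]
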